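-- pv_equiv track=rewrite | github.com/Diego77Blaze/Algoritmia | Lab4/Ejer4.py | getResultValue
-- ===== SOURCE A (Python) =====
-- def getResultValue(maxfila, lista, maxAlforja, weightUsed, result):
--     if maxfila >= 0:
--         if lista[maxfila][2] == 0 and maxAlforja >= weightUsed + lista[maxfila][0]:
--             resultAux = getResultValue(maxfila - 1, lista, maxAlforja, weightUsed + lista[maxfila][0],
--                                        result + lista[maxfila][1])
--         else:
--             resultAux = getResultValue(maxfila - 1, lista, maxAlforja, weightUsed, result)
--     else:
--         resultAux = result
--     return resultAux
-- ===== SOURCE B (Python) =====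
-- def getResultValue(maxfila, lista, maxAlforja, weightUsed, result):
--     for i in range(maxfila, -1, -1):
--         w, v, flag = lista[i]
--         if flag == 0 and maxAlforja >= weightUsed + w:
--             weightUsed += w
--             result += v
--     return result
-- ===== Notes on version B (the rewrite author's own statement) =====
-- stated objective: simpler
-- what changed: Replaces the linear recursion with an iterative descending for-loop over range(maxfila, -1, -1) carrying the weight and value accumulators as local variables.
import Mathlib
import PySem

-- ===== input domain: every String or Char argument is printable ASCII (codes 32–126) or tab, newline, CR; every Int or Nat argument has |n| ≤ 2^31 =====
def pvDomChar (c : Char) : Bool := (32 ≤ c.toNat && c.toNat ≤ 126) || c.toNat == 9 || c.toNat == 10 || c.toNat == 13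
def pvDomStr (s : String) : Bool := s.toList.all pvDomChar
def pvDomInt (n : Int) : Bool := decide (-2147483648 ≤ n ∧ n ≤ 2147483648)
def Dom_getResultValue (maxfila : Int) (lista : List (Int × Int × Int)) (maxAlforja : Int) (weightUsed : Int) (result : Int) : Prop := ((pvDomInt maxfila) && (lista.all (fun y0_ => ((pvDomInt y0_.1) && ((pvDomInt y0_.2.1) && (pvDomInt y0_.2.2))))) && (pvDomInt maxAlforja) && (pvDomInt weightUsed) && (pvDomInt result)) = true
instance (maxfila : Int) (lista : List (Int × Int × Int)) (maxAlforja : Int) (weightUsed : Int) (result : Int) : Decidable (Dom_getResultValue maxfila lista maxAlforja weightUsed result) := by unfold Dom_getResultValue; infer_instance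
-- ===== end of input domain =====

-- ===== PORT A =====
-- B replaces A's linear recursion by an iterative descending loop (objective: simpler);
-- Pre_ excludes inputs where A raises IndexError (0 ≤ maxfila and maxfila ≥ len(lista)).
def getResultValue (maxfila : Int) (lista : List (Int × Int × Int)) (maxAlforja : Int) (weightUsed : Int) (result : Int) : Int :=
  if _h : maxfila ≥ 0 then
    match PySem.List.pyGet? lista maxfila with
    | some item =>
      if item.2.2 == 0 && decide (maxAlforja ≥ weightUsed + item.1) then
        getResultValue (maxfila - 1) lista maxAlforja (weightUsed + item.1) (result + item.2.1)
      else
        getResultValue (maxfila - 1) lista maxAlforja weightUsed result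
    | none => 0  -- IndexError in Python; excluded by Pre_getResultValue
  else
    result
termination_by (maxfila + 1).toNat
decreasing_by all_goals omega

-- ===== PORT B =====
def getResultValue_alt (maxfila : Int) (lista : List (Int × Int × Int)) (maxAlforja : Int) (weightUsed : Int) (result : Int) : Int :=
  ((PySem.List.pyRange maxfila (-1) (-1)).foldl
    (fun (st : Int × Int) i =>
      match PySem.List.pyGet? lista i with
      | some item =>
        if item.2.2 == 0 && decide (maxAlforja ≥ st.1 + item.1) then
          (st.1 + item.1, st.2 + item.2.1)
        else st
      | none => st  -- IndexError in Python; excluded by Pre_getResultValue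
      )
    (weightUsed, result)).2

-- ===== PRECONDITION & SPEC =====
-- Pre_ excludes exactly the inputs where both Pythons raise IndexError: an index 0 ≤ i ≤ maxfila out of range.
def Pre_getResultValue (maxfila : Int) (lista : List (Int × Int × Int)) (maxAlforja : Int) (weightUsed : Int) (result : Int) : Prop :=
  maxfila < lista.length
instance (maxfila : Int) (lista : List (Int × Int × Int)) (maxAlforja : Int) (weightUsed : Int) (result : Int) : Decidable (Pre_getResultValue maxfila lista maxAlforja weightUsed result) := by unfold Pre_getResultValue; infer_instance
def pvWitness_getResultValue : Int × (List (Int × Int × Int)) × Int × Int × Int :=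
  (1, [(2, 3, 0), (4, 5, 0)], 10, 0, 0)
def Spec_getResultValue (maxfila : Int) (lista : List (Int × Int × Int)) (maxAlforja : Int) (weightUsed : Int) (result : Int) (out : Int) : Prop := out = getResultValue_alt maxfila lista maxAlforja weightUsed result
instance (maxfila : Int) (lista : List (Int × Int × Int)) (maxAlforja : Int) (weightUsed : Int) (result : Int) (out : Int) : Decidable (Spec_getResultValue maxfila lista maxAlforja weightUsed result out) := by unfold Spec_getResultValue; infer_instance

-- ===== CLAIM (what is proved, stated in full; the proofs are below) =====
def Claim_equal_getResultValue : Prop := ∀ (maxfila : Int) (lista : List (Int × Int × Int)) (maxAlforja : Int) (weightUsed : Int) (result : Int), Dom_getResultValue maxfila lista maxAlforja weightUsed result → Pre_getResultValue maxfila lista maxAlforja weightUsed result → Spec_getResultValue maxfila lista maxAlforja weightUsed result (getResultValue maxfila lista maxAlforja weightUsed result)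

-- ===== LEMMAS AND PROOFS =====
lemma getResultValue_key (lista : List (Int × Int × Int)) (maxAlforja : Int) :
    ∀ (n : Nat) (maxfila : Int), maxfila < n → maxfila < lista.length →
    ∀ (weightUsed result : Int),
      getResultValue maxfila lista maxAlforja weightUsed result
        = getResultValue_alt maxfila lista maxAlforja weightUsed result := by
  intro n
  induction n with
  | zero =>
    intro maxfila hn _ wu r
    have hneg : maxfila < 0 := by exact_mod_cast hn
    rw [getResultValue]
    simp only [getResultValue_alt, PySem.List.pyRange_neg_one_eq_nil (by omega : maxfila ≤ -1),
      List.foldl_nil]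
    simp [show ¬ maxfila ≥ 0 by omega]
  | succ n ih =>
    intro maxfila hn hlen wu r
    by_cases hpos : maxfila ≥ 0
    · have hlt : maxfila.toNat < lista.length := by omega
      have hsome : PySem.List.pyGet? lista maxfila = some lista[maxfila.toNat] := by
        have h1 : PySem.List.pyGet? lista ((maxfila.toNat : Nat) : Int) = lista[maxfila.toNat]? :=
          PySem.List.pyGet?_natCast ..
        rw [show ((maxfila.toNat : Nat) : Int) = maxfila by omega] at h1
        rw [h1]
        exact List.getElem?_eq_getElem hlt
      rw [getResultValue]
      simp only [hpos, dif_pos, hsome]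
      unfold getResultValue_alt
      rw [PySem.List.pyRange_neg_one_cons (by omega : (-1 : Int) < maxfila), List.foldl_cons, hsome]
      split_ifs with hc <;>
        rw [ih _ (by omega) (by omega)] <;> unfold getResultValue_alt <;> simp [hc]
    · rw [getResultValue]
      simp only [getResultValue_alt, PySem.List.pyRange_neg_one_eq_nil (by omega : maxfila ≤ -1),
        List.foldl_nil]
      simp [hpos]

-- ===== VERDICT (by name: the statement is the Claim_ definition above) =====
theorem getResultValue_spec : Claim_equal_getResultValue := by
  intro maxfila lista maxAlforja wu r _hDom hPre
  exact getResultValue_key lista maxAlforja (maxfila.toNat + 1) maxfila (by omega) hPre wu r
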